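-- pv_equiv track=rewrite | github.com/Sarrthhak/Page-Replacement-Simulator | app.py | lru
-- ===== SOURCE A (Python) =====
-- def lru(pages, frames):
--     memory, page_faults = [], 0
--     memory_states = []
--     page_indices = {}  # Dictionary to track the last usage of each page
--
--     for i, page in enumerate(pages):
--         if page not in memory:
--             if len(memory) < frames:
--                 memory.append(page)
--             else:
--                 # Find the least recently used page and replace it
--                 lru_page = min(memory, key=lambda p: page_indices.get(p, -1))
--                 memory.remove(lru_page)
--                 memory.append(page)
--             page_faults += 1
--         page_indices[page] = i  # Update the last used index for the page
--         memory_states.append(memory.copy())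
--
--     return page_faults, memory_states
-- ===== SOURCE B (Python) =====
-- def lru(pages, frames):
--     memory, page_faults = [], 0
--     memory_states = []
--     recency = []  # pages in memory, least -> most recently used
--
--     for page in pages:
--         if page in memory:
--             recency.remove(page)
--         else:
--             if len(memory) >= frames:
--                 victim = recency.pop(0)
--                 memory.remove(victim)
--             memory.append(page)
--             page_faults += 1
--         recency.append(page)
--         memory_states.append(memory.copy())
--
--     return page_faults, memory_states
-- ===== Notes on version B (the rewrite author's own statement) =====
-- stated objective: alternative
-- what changed: Replaces the last-use-index dictionary and the per-fault min-over-frames scan with an incrementally maintained recency list (least to most recently used), so the victim on a fault is simply the front of that list.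
import Mathlib
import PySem

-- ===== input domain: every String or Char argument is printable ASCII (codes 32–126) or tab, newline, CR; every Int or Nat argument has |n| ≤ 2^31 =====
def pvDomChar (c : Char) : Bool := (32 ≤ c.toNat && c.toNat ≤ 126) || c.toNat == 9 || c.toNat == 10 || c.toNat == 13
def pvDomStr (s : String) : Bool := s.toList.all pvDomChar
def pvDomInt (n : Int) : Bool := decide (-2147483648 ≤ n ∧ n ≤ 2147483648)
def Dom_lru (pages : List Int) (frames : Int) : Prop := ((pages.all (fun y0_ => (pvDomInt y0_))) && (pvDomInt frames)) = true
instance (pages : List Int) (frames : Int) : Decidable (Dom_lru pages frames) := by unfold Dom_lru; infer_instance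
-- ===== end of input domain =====

-- B drops A's last-use-index dictionary and min-over-frames scan, maintaining instead a
-- recency list (least->most recently used) whose front is the eviction victim.


-- ===== PORT A =====
-- the 'none' branches below are unreachable under Pre_lru (Python raises ValueError there)
def lruGo (frames : Int) (memory : List Int) (faults : Int) (states : List (List Int))
    (idx : PySem.Dict Int Int) : List (Int × Int) → Int × List (List Int)
  | [] => (faults, states)
  | (i, page) :: rest =>
    if memory.contains page then
      lruGo frames memory faults (states ++ [memory]) (idx.insert page i) rest
    else if (memory.length : Int) < frames then
      let m := memory ++ [page]
      lruGo frames m (faults + 1) (states ++ [m]) (idx.insert page i) rest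
    else
      let lruPage := (PySem.List.min? memory (fun p => idx.getD p (-1))).getD 0
      let m := ((PySem.List.remove? memory lruPage).getD memory) ++ [page]
      lruGo frames m (faults + 1) (states ++ [m]) (idx.insert page i) rest

def lru (pages : List Int) (frames : Int) : Int × List (List Int) :=
  lruGo frames [] 0 [] PySem.Dict.empty (PySem.List.enumerate pages)

-- ===== PORT B =====
-- the 'none' branches below are unreachable under Pre_lru (Python raises IndexError there)
def lruAltGo (frames : Int) (memory recency : List Int) (faults : Int)
    (states : List (List Int)) : List Int → Int × List (List Int)
  | [] => (faults, states)
  | page :: rest =>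
    if memory.contains page then
      let r := (PySem.List.remove? recency page).getD recency
      lruAltGo frames memory (r ++ [page]) faults (states ++ [memory]) rest
    else
      let mr : List Int × List Int :=
        if (memory.length : Int) ≥ frames then
          match PySem.List.pop? recency 0 with
          | some (victim, r') => (((PySem.List.remove? memory victim).getD memory), r')
          | none => (memory, recency)
        else (memory, recency)
      let m := mr.1 ++ [page]
      lruAltGo frames m (mr.2 ++ [page]) (faults + 1) (states ++ [m]) rest

def lru_alt (pages : List Int) (frames : Int) : Int × List (List Int) :=
  lruAltGo frames [] [] 0 [] pages

-- ===== PRECONDITION & SPEC =====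
-- Pre_ excludes frames ≤ 0 with nonempty pages, where the Python A raises ValueError (min of
-- an empty sequence) and the Python B raises IndexError (pop from an empty list).
def Pre_lru (pages : List Int) (frames : Int) : Prop := 1 ≤ frames ∨ pages = []
instance (pages : List Int) (frames : Int) : Decidable (Pre_lru pages frames) := by unfold Pre_lru; infer_instance

def pvWitness_lru : List Int × Int := ([1, 2, 3, 1, 4, 2], 3)

def Spec_lru (pages : List Int) (frames : Int) (out : Int × List (List Int)) : Prop := out = lru_alt pages frames
instance (pages : List Int) (frames : Int) (out : Int × List (List Int)) : Decidable (Spec_lru pages frames out) := by unfold Spec_lru; infer_instance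

-- ===== CLAIM (what is proved, stated in full; the proofs are below) =====
def Claim_equal_lru : Prop := ∀ (pages : List Int) (frames : Int), Dom_lru pages frames → Pre_lru pages frames → Spec_lru pages frames (lru pages frames)

-- ===== LEMMAS AND PROOFS =====

-- In a list whose head precedes every element and whose keys strictly increase, the head is
-- the unique key-minimum of any permutation of it.
lemma min?_of_perm_sorted (memory : List Int) (key : Int → Int) (v : Int) (rtl : List Int)
    (hperm : (v :: rtl).Perm memory)
    (hpw : (v :: rtl).Pairwise (fun a b => key a < key b)) :
    PySem.List.min? memory key = some v := by
  have hvmem : v ∈ memory := hperm.mem_iff.mp (List.mem_cons_self)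
  cases hmin : PySem.List.min? memory key with
  | none =>
    rw [PySem.List.min?_eq_none_iff] at hmin
    simp [hmin] at hvmem
  | some m =>
    have hm : m ∈ memory := PySem.List.min?_mem hmin
    have hle : key m ≤ key v := PySem.List.min?_isMin hmin v hvmem
    have hm' : m ∈ v :: rtl := hperm.mem_iff.mpr hm
    rcases List.mem_cons.mp hm' with h | h
    · rw [h]
    · have := (List.pairwise_cons.mp hpw).1 m h
      omega

lemma go_eq (pages : List Int) : ∀ (i frames : Int), 1 ≤ frames →
    ∀ (memory recency : List Int) (faults : Int) (states : List (List Int))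
      (idx : PySem.Dict Int Int),
    memory.Nodup → recency.Perm memory →
    recency.Pairwise (fun a b => idx.getD a (-1) < idx.getD b (-1)) →
    (∀ p ∈ memory, idx.getD p (-1) < i) →
    lruGo frames memory faults states idx (PySem.List.enumerate pages i)
      = lruAltGo frames memory recency faults states pages := by
  induction pages with
  | nil => intro i frames hf memory recency faults states idx _ _ _ _; simp [PySem.List.enumerate_nil, lruGo, lruAltGo]
  | cons page rest ih =>
    intro i frames hf memory recency faults states idx hnd hperm hpw hlt
    rw [PySem.List.enumerate_cons]
    have hrecnd : recency.Nodup := hperm.nodup_iff.mpr hnd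
    by_cases hmem : page ∈ memory
    · -- hit
      have hcont : memory.contains page = true := by simpa using hmem
      rw [lruGo, lruAltGo]
      simp only [hcont, if_pos]
      have hrec : page ∈ recency := hperm.mem_iff.mpr hmem
      have hrm : (PySem.List.remove? recency page).getD recency = recency.erase page := by
        rw [PySem.List.remove?_eq_some_erase recency page hrec]; rfl
      rw [hrm]
      apply ih (i + 1) frames hf memory (recency.erase page ++ [page]) faults
        (states ++ [memory]) (idx.insert page i) hnd
      · -- permutation
        exact ((List.perm_append_singleton _ _).trans (List.perm_cons_erase hrec).symm).trans hperm
      · -- pairwise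
        have hsub : (recency.erase page).Sublist recency := List.erase_sublist
        have hnp : ∀ a ∈ recency.erase page, a ≠ page := by
          intro a ha
          exact (List.Nodup.mem_erase_iff hrecnd).mp ha |>.1
        apply List.pairwise_append.mpr
        refine ⟨?_, List.pairwise_singleton _ _, ?_⟩
        · apply (hpw.sublist hsub).imp_of_mem
          intro a b ha hb hab
          rw [PySem.Dict.getD_insert_of_ne _ _ _ (hnp a ha),
              PySem.Dict.getD_insert_of_ne _ _ _ (hnp b hb)]
          exact hab
        intro a ha b hb
        rw [List.mem_singleton] at hb; subst hb
        have haR : a ∈ recency := hsub.mem ha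
        have haM : a ∈ memory := hperm.mem_iff.mp haR
        rw [PySem.Dict.getD_insert_of_ne _ _ _ (hnp a ha),
            PySem.Dict.getD_insert_self]
        exact hlt a haM
      · intro p hp
        by_cases hpp : p = page
        · subst hpp; rw [PySem.Dict.getD_insert_self]; omega
        · rw [PySem.Dict.getD_insert_of_ne _ _ _ hpp]
          have := hlt p hp; omega
    · -- fault
      have hcont : memory.contains page = false := by simpa using hmem
      by_cases hlen : (memory.length : Int) < frames
      · -- room: insert
        rw [lruGo, lruAltGo]
        simp only [hcont, Bool.false_eq_true, if_false, if_pos hlen, if_neg (by omega : ¬ (memory.length : Int) ≥ frames)]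
        apply ih (i + 1) frames hf (memory ++ [page]) (recency ++ [page]) (faults + 1)
          (states ++ [memory ++ [page]]) (idx.insert page i)
        · simp [List.nodup_append, hnd]
          intro a ha
          rintro rfl
          exact hmem ha
        · exact hperm.append_right [page]
        · apply List.pairwise_append.mpr
          refine ⟨?_, List.pairwise_singleton _ _, ?_⟩
          · apply hpw.imp_of_mem
            intro a b ha hb hab
            have haM : a ∈ memory := hperm.mem_iff.mp ha
            have hbM : b ∈ memory := hperm.mem_iff.mp hb
            rw [PySem.Dict.getD_insert_of_ne _ _ _ (by rintro rfl; exact hmem haM),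
                PySem.Dict.getD_insert_of_ne _ _ _ (by rintro rfl; exact hmem hbM)]
            exact hab
          · intro a ha b hb
            rw [List.mem_singleton] at hb; subst hb
            have haM : a ∈ memory := hperm.mem_iff.mp ha
            rw [PySem.Dict.getD_insert_of_ne _ _ _ (by rintro rfl; exact hmem haM),
                PySem.Dict.getD_insert_self]
            exact hlt a haM
        · intro p hp
          rcases List.mem_append.mp hp with h | h
          · rw [PySem.Dict.getD_insert_of_ne _ _ _ (by rintro rfl; exact hmem h)]
            have := hlt p h; omega
          · rw [List.mem_singleton] at h; subst h
            rw [PySem.Dict.getD_insert_self]; omega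
      · -- full: evict
        have hmemne : memory ≠ [] := by
          intro h; subst h; simp at hlen; omega
        obtain ⟨v, rtl, hrec⟩ : ∃ v rtl, recency = v :: rtl := by
          cases recency with
          | nil => exact absurd hperm.symm.eq_nil hmemne
          | cons v rtl => exact ⟨v, rtl, rfl⟩
        subst hrec
        have hvM : v ∈ memory := hperm.mem_iff.mp (List.mem_cons_self)
        have hmin : PySem.List.min? memory (fun p => idx.getD p (-1)) = some v :=
          min?_of_perm_sorted memory _ v rtl hperm hpw
        rw [lruGo, lruAltGo]
        simp only [hcont, Bool.false_eq_true, if_false, if_neg hlen,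
          if_pos (by omega : (memory.length : Int) ≥ frames), hmin, PySem.List.pop?_zero_cons]
        have hrm : (PySem.List.remove? memory v).getD memory = memory.erase v := by
          rw [PySem.List.remove?_eq_some_erase memory v hvM]; rfl
        simp only [Option.getD_some, hrm]
        have hperm' : rtl.Perm (memory.erase v) := by
          have := hperm.erase v
          simpa using this
        have hpwtl := List.pairwise_cons.mp hpw
        apply ih (i + 1) frames hf (memory.erase v ++ [page]) (rtl ++ [page]) (faults + 1)
          _ (idx.insert page i)
        · have : (memory.erase v).Nodup := hnd.erase v
          have hpe : page ∉ memory.erase v := fun h => hmem (List.mem_of_mem_erase h)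
          simp [List.nodup_append, this]
          intro a ha
          rintro rfl
          exact hpe ha
        · exact hperm'.append_right [page]
        · apply List.pairwise_append.mpr
          refine ⟨?_, List.pairwise_singleton _ _, ?_⟩
          · apply hpwtl.2.imp_of_mem
            intro a b ha hb hab
            have haM : a ∈ memory := hperm.mem_iff.mp (List.mem_cons_of_mem _ ha)
            have hbM : b ∈ memory := hperm.mem_iff.mp (List.mem_cons_of_mem _ hb)
            rw [PySem.Dict.getD_insert_of_ne _ _ _ (by rintro rfl; exact hmem haM),
                PySem.Dict.getD_insert_of_ne _ _ _ (by rintro rfl; exact hmem hbM)]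
            exact hab
          · intro a ha b hb
            rw [List.mem_singleton] at hb; subst hb
            have haM : a ∈ memory := hperm.mem_iff.mp (List.mem_cons_of_mem _ ha)
            rw [PySem.Dict.getD_insert_of_ne _ _ _ (by rintro rfl; exact hmem haM),
                PySem.Dict.getD_insert_self]
            exact hlt a haM
        · intro p hp
          rcases List.mem_append.mp hp with h | h
          · have hpM : p ∈ memory := List.mem_of_mem_erase h
            rw [PySem.Dict.getD_insert_of_ne _ _ _ (by rintro rfl; exact hmem hpM)]
            have := hlt p hpM; omega
          · rw [List.mem_singleton] at h; subst h
            rw [PySem.Dict.getD_insert_self]; omega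

-- ===== VERDICT (by name: the statement is the Claim_ definition above) =====
theorem lru_spec : Claim_equal_lru := by
  intro pages frames _ hpre
  unfold Spec_lru lru lru_alt
  rcases hpre with hf | hnil
  · exact go_eq pages 0 frames hf [] [] 0 [] PySem.Dict.empty List.nodup_nil (List.Perm.refl _) List.Pairwise.nil (by simp)
  · subst hnil; rfl
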